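-- pv_equiv track=rewrite | github.com/chrisworth75/dev-familytree | tmp-scripts/migrate_ahnentafel.py | ahnentafel_to_path
-- ===== SOURCE A (Python) =====
-- def ahnentafel_to_path(n: int) -> str:
--     """Convert ahnentafel number to human readable path like "Dad's Dad's Mum"."""
--     if n == 1:
--         return "Me"
--
--     path_parts = []
--     current = n
--
--     while current > 1:
--         if current % 2 == 0:
--             path_parts.append("Dad")
--         else:
--             path_parts.append("Mum")
--         current //= 2
--
--     # Reverse to get from me outward
--     path_parts.reverse()
--
--     # Build possessive path
--     if len(path_parts) == 1:
--         return path_parts[0]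
--
--     result = path_parts[0]
--     for part in path_parts[1:]:
--         result += "'s " + part
--
--     return result
-- ===== SOURCE B (Python) =====
-- def ahnentafel_to_path(n: int) -> str:
--     """Convert ahnentafel number to human readable path like "Dad's Dad's Mum"."""
--     if n == 1:
--         return "Me"
--     # Binary digits of n after the leading 1 are exactly the path from me outward:
--     # 0 bit = father side ("Dad"), 1 bit = mother side ("Mum").
--     bits = format(n, "b")[1:]
--     return "'s ".join("Dad" if b == "0" else "Mum" for b in bits)
-- ===== Notes on version B (the rewrite author's own statement) =====
-- stated objective: alternative
-- what changed: Replaces the divide-by-2 append-then-reverse loop and the manual possessive-concatenation pass with a direct read of n's binary representation: the digits after the leading 1 (format(n,'b')[1:]) are mapped to Dad/Mum and joined with "'s ".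
-- outside the precondition, e.g. on ahnentafel_to_path(0): A raises IndexError, B returns ''
import Mathlib
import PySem

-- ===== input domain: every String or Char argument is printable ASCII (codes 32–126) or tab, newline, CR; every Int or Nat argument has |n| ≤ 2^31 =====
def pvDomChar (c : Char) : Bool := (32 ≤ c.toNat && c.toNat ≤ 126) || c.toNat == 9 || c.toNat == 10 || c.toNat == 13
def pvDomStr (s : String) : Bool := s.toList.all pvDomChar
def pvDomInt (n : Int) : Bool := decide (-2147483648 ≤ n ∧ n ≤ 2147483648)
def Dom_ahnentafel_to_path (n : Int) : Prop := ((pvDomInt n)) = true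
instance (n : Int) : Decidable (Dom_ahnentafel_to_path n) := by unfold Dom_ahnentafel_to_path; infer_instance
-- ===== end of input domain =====

-- B reads the ancestor path straight off n's binary digits (format(n,'b')[1:]) instead of
-- A's divide-by-2 append-then-reverse loop followed by a manual possessive-concatenation pass.

-- ===== PORT A =====
-- while current > 1: append "Dad"/"Mum"; current //= 2
def pvLoopA (current : Int) : List String :=
  if _h : current > 1 then
    (if current % 2 == 0 then "Dad" else "Mum") :: pvLoopA (PySem.Int.floordiv current 2)
  else []
termination_by current.toNat
decreasing_by
  rw [PySem.Int.floordiv_eq_ediv_of_pos (by omega)]; omega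

def ahnentafel_to_path (n : Int) : String :=
  if n == 1 then "Me"
  else
    let path_parts := (pvLoopA n).reverse
    if path_parts.length == 1 then (PySem.List.pyGet? path_parts 0).getD ""   -- path_parts[0]; none (IndexError) only outside Pre_
    else
      let result := (PySem.List.pyGet? path_parts 0).getD ""
      List.foldl (fun r part => r ++ "'s " ++ part) result (PySem.List.slice path_parts (some 1) none)

-- ===== PORT B =====
-- format(m,'b') for a natural m, as a list of '0'/'1' characters (hand port, exact)
def pvBinNat (m : Nat) : List Char :=
  if _h : m < 2 then [Char.ofNat (48 + m)]
  else pvBinNat (m / 2) ++ [Char.ofNat (48 + m % 2)]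
termination_by m

-- format(n,'b') for an int: a '-' sign followed by the digits of |n| (hand port, exact)
def pvFormatBin (n : Int) : List Char :=
  if n < 0 then '-' :: pvBinNat (-n).toNat else pvBinNat n.toNat

def ahnentafel_to_path_alt (n : Int) : String :=
  if n == 1 then "Me"
  else
    let bits := PySem.List.slice (pvFormatBin n) (some 1) none      -- format(n,'b')[1:]
    PySem.Str.join "'s " (bits.map (fun b => if b == '0' then "Dad" else "Mum"))

-- ===== PRECONDITION & SPEC =====
-- Pre_ excludes n <= 0, on which A raises IndexError (path_parts[0] on an empty list).
def Pre_ahnentafel_to_path (n : Int) : Prop := 1 ≤ n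
instance (n : Int) : Decidable (Pre_ahnentafel_to_path n) := by unfold Pre_ahnentafel_to_path; infer_instance
def pvWitness_ahnentafel_to_path : Int := 6
def Spec_ahnentafel_to_path (n : Int) (out : String) : Prop := out = ahnentafel_to_path_alt n
instance (n : Int) (out : String) : Decidable (Spec_ahnentafel_to_path n out) := by unfold Spec_ahnentafel_to_path; infer_instance

-- ===== CLAIM (what is proved, stated in full; the proofs are below) =====
def Claim_equal_ahnentafel_to_path : Prop := ∀ (n : Int), Dom_ahnentafel_to_path n → Pre_ahnentafel_to_path n → Spec_ahnentafel_to_path n (ahnentafel_to_path n)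

-- ===== LEMMAS AND PROOFS =====

lemma pvStrExt {a b : String} (h : a.toList = b.toList) : a = b := by
  have := congrArg String.ofList h
  simpa [String.ofList_toList] using this

lemma pvBinNat_ne_nil (m : Nat) : pvBinNat m ≠ [] := by
  rw [pvBinNat]; split <;> simp

-- A's reversed loop output is B's mapped binary tail.
lemma pvLoop_eq_bits (m : Nat) (h : 2 ≤ m) :
    (pvLoopA (m : Int)).reverse
      = ((pvBinNat m).tail).map (fun b => if b == '0' then "Dad" else "Mum") := by
  induction m using Nat.strong_induction_on with
  | _ m ih =>
    rw [pvLoopA, pvBinNat]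
    rw [dif_pos (by omega : (m : Int) > 1), dif_neg (by omega : ¬ m < 2)]
    have hfd : PySem.Int.floordiv (m : Int) 2 = ((m / 2 : Nat) : Int) := by
      rw [PySem.Int.floordiv_eq_ediv_of_pos (by omega)]; omega
    rw [hfd, List.reverse_cons, List.tail_append_of_ne_nil (pvBinNat_ne_nil _), List.map_append]
    congr 1
    · by_cases h2 : 2 ≤ m / 2
      · exact ih (m / 2) (by omega) h2
      · have hh : m / 2 = 1 := by omega
        rw [hh, pvLoopA, pvBinNat]
        simp
    · rcases Nat.even_or_odd m with he | ho
      · have h0 : m % 2 = 0 := Nat.even_iff.mp he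
        have h0' : (m : Int) % 2 = 0 := by omega
        simp [h0, h0']
      · have h1 : m % 2 = 1 := Nat.odd_iff.mp ho
        have h1' : (m : Int) % 2 = 1 := by omega
        simp [h1, h1']

lemma pvLoopA_ne_nil (n : Int) (h : 2 ≤ n) : pvLoopA n ≠ [] := by
  rw [pvLoopA]; split
  · simp
  · omega

lemma pvJoin_singleton (p : String) : PySem.Str.join "'s " [p] = p := by
  apply pvStrExt
  rw [PySem.Str.toList_join]
  simp only [List.map_cons, List.map_nil]
  rw [PySem.Chars.join_singleton]

lemma pvJoin_cons_cons (p q : String) (rest : List String) :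
    PySem.Str.join "'s " (p :: q :: rest) = p ++ "'s " ++ PySem.Str.join "'s " (q :: rest) := by
  apply pvStrExt
  rw [PySem.Str.toList_join]
  simp only [List.map_cons, String.toList_append, PySem.Str.toList_join]
  rw [PySem.Chars.join_cons_cons]

-- the manual possessive pass is a join
lemma pvFoldl_join (l : List String) (p : String) :
    List.foldl (fun r x => r ++ "'s " ++ x) p l = PySem.Str.join "'s " (p :: l) := by
  induction l generalizing p with
  | nil => rw [List.foldl_nil, pvJoin_singleton]
  | cons q t ih =>
    rw [List.foldl_cons, ih]
    cases t with
    | nil => rw [pvJoin_singleton, pvJoin_cons_cons, pvJoin_singleton]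
    | cons a t' =>
      rw [pvJoin_cons_cons (p ++ "'s " ++ q) a t', pvJoin_cons_cons p q (a :: t'),
        pvJoin_cons_cons q a t']
      simp [String.append_assoc]

-- ===== VERDICT (by name: the statement is the Claim_ definition above) =====
theorem ahnentafel_to_path_spec : Claim_equal_ahnentafel_to_path := by
  intro n _ hpre
  unfold Spec_ahnentafel_to_path ahnentafel_to_path ahnentafel_to_path_alt
  by_cases h1 : n = 1
  · simp [h1]
  · have h2 : 2 ≤ n := by unfold Pre_ahnentafel_to_path at hpre; omega
    have hm : n = ((n.toNat : Nat) : Int) := by omega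
    have hm2 : 2 ≤ n.toNat := by omega
    have hne : ¬ (n == 1) = true := by simpa using h1
    rw [if_neg hne, if_neg hne]
    dsimp only
    have hbits : PySem.List.slice (pvFormatBin n) (some 1) none = (pvBinNat n.toNat).tail := by
      rw [PySem.List.slice_from_one]
      unfold pvFormatBin
      rw [if_neg (by omega : ¬ n < 0)]
    rw [hbits]
    have hlist : (pvLoopA n).reverse
        = ((pvBinNat n.toNat).tail).map (fun b => if b == '0' then "Dad" else "Mum") := by
      rw [hm]; exact pvLoop_eq_bits n.toNat hm2
    rw [← hlist]
    obtain ⟨p, rest, hpr⟩ : ∃ p rest, (pvLoopA n).reverse = p :: rest := by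
      cases hb : (pvLoopA n).reverse with
      | nil => exact absurd (List.reverse_eq_nil_iff.mp hb) (pvLoopA_ne_nil n h2)
      | cons p rest => exact ⟨p, rest, rfl⟩
    rw [hpr]
    simp only [PySem.List.pyGet?_zero_cons, Option.getD_some, PySem.List.slice_from_one,
      List.tail_cons, List.length_cons]
    cases rest with
    | nil => rw [if_pos (by simp), pvJoin_singleton]
    | cons q qs =>
      rw [if_neg (by simp), pvFoldl_join]
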